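-- pv_equiv track=rewrite | github.com/eightmm/cov-vina | src/lig_align/molecular/functional_groups.py | _merge_fused_rings
-- ===== SOURCE A (Python) =====
-- from typing import List, Set, Tuple
--
-- def _merge_fused_rings(rings: List[Set[int]]) -> List[Set[int]]:
--     """Merge fused aromatic rings into single systems"""
--     systems = []
--
--     for ring in rings:
--         merged = False
--         for system in systems:
--             if ring & system:  # If they share atoms (fused)
--                 system.update(ring)
--                 merged = True
--                 break
--
--         if not merged:
--             systems.append(ring.copy())
--
--     # Continue merging until no more changes
--     changed = True
--     while changed:
--         changed = False
--         new_systems = []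
--         used = set()
--
--         for i, sys1 in enumerate(systems):
--             if i in used:
--                 continue
--
--             for j, sys2 in enumerate(systems[i+1:], start=i+1):
--                 if j in used:
--                     continue
--
--                 if sys1 & sys2:
--                     sys1.update(sys2)
--                     used.add(j)
--                     changed = True
--
--             new_systems.append(sys1)
--
--         systems = new_systems
--
--     return systems
-- ===== SOURCE B (Python) =====
-- from typing import List, Set
--
-- def _merge_fused_rings(rings: List[Set[int]]) -> List[Set[int]]:
--     """Merge fused aromatic rings into single systems.
--
--     Builds an atom -> ring-indices index once, then emits each connected
--     component of the ring-overlap graph by a depth-first search, seeded at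
--     the smallest unvisited ring index (so components come out ordered by
--     their first ring's index).
--     """
--     atom_rings = {}
--     for idx, ring in enumerate(rings):
--         for atom in ring:
--             atom_rings.setdefault(atom, []).append(idx)
--
--     seen = set()
--     systems = []
--     for i in range(len(rings)):
--         if i in seen:
--             continue
--         seen.add(i)
--         stack = [i]
--         system = set()
--         while stack:
--             j = stack.pop()
--             system.update(rings[j])
--             for atom in rings[j]:
--                 for k in atom_rings[atom]:
--                     if k not in seen:
--                         seen.add(k)
--                         stack.append(k)
--         systems.append(system)
--     return systems
-- ===== Notes on version B (the rewrite author's own statement) =====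
-- stated objective: alternative
-- what changed: Replaces A's first-intersecting-merge pass plus repeated merge-to-fixpoint passes with an atom-to-ring-indices index built once and a depth-first search that emits each connected ring component directly, ordered by first ring index.
import Mathlib
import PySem

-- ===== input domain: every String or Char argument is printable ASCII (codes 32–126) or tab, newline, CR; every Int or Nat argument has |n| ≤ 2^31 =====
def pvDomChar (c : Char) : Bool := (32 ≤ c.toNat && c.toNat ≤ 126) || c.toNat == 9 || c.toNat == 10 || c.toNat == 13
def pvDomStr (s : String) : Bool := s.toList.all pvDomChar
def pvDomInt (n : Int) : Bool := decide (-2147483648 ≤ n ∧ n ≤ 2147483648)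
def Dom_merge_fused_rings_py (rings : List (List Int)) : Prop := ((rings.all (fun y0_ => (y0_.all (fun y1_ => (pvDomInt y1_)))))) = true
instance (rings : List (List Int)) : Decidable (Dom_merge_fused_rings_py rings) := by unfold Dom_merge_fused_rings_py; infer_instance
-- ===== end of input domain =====

-- B computes the same fused-ring systems by a different algorithm: one atom→ring-indices map and
-- a depth-first search that emits each connected component directly, instead of A's first-
-- intersecting-merge pass followed by repeated merge-to-fixpoint passes (objective: alternative).
-- NOTE on sets: the Python function takes and returns SETS of ints (list[set[int]]); Python's set
-- iteration order is not modelled by PySem, so both ports represent each returned set canonically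
-- in increasing order (exact as list-of-sets; outer list order is as returned by the Python).

-- ===== PORT A =====
def pvFirstMergeA (ring : List Int) : List (List Int) → Option (List (List Int))
  | [] => none
  | s :: rest =>
    if PySem.Set.inter ring s ≠ [] then some (PySem.Set.update s ring :: rest)
    else (pvFirstMergeA ring rest).map (s :: ·)

def pvStep1A (systems : List (List Int)) (ring : List Int) : List (List Int) :=
  match pvFirstMergeA ring systems with
  | some systems' => systems'
  | none => systems ++ [PySem.Set.ofList ring]

def pvPhase1A (rings : List (List Int)) : List (List Int) :=
  rings.foldl pvStep1A []

def pvInnerA (sys : List (List Int)) (s1 : List Int) (j : Nat) (used : PySem.Set Nat)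
    (changed : Bool) : List Int × PySem.Set Nat × Bool :=
  if j < sys.length then
    if used.contains j then pvInnerA sys s1 (j+1) used changed
    else if PySem.Set.inter s1 (sys.getD j []) ≠ [] then
      pvInnerA sys (PySem.Set.update s1 (sys.getD j [])) (j+1) (PySem.Set.add used j) true
    else pvInnerA sys s1 (j+1) used changed
  else (s1, used, changed)
termination_by sys.length - j

def pvOuterA (sys : List (List Int)) (i : Nat) (used : PySem.Set Nat)
    (acc : List (List Int)) (changed : Bool) : List (List Int) × Bool :=
  if i < sys.length then
    if used.contains i then pvOuterA sys (i+1) used acc changed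
    else
      let r := pvInnerA sys (sys.getD i []) (i+1) used changed
      pvOuterA sys (i+1) r.2.1 (acc ++ [r.1]) r.2.2
  else (acc, changed)
termination_by sys.length - i

def pvWhileA (sys : List (List Int)) : Nat → List (List Int)
  | 0 => sys
  | fuel+1 =>
    let r := pvOuterA sys 0 [] [] false
    if r.2 then pvWhileA r.1 fuel else r.1

def merge_fused_rings_py (rings : List (List Int)) : List (List Int) :=
  (pvWhileA (pvPhase1A rings) (rings.length + 1)).map
    (fun s => PySem.List.sorted s (fun x => x) false)

-- ===== PORT B =====
def pvIndexB (rings : List (List Int)) : PySem.Dict Int (List Nat) :=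
  rings.zipIdx.foldl (fun d p =>
    p.1.foldl (fun d atom => d.modify atom [] (· ++ [p.2])) d) PySem.Dict.empty

def pvPushB (idx : PySem.Dict Int (List Nat)) (ring : List Int)
    (st : List Nat × PySem.Set Nat) : List Nat × PySem.Set Nat :=
  ring.foldl (fun st atom =>
    (idx.getD atom []).foldl (fun st k =>
      if st.2.contains k then st else (k :: st.1, PySem.Set.add st.2 k)) st) st

def pvDfsB (rings : List (List Int)) (idx : PySem.Dict Int (List Nat)) :
    Nat → List Nat → PySem.Set Nat → List Int → List Int × PySem.Set Nat
  | 0, _, seen, system => (system, seen)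
  | _+1, [], seen, system => (system, seen)
  | fuel+1, j :: rest, seen, system =>
    let ring := rings.getD j []
    let st := pvPushB idx ring (rest, seen)
    pvDfsB rings idx fuel st.1 st.2 (PySem.Set.update system ring)

def pvLoopB (rings : List (List Int)) (idx : PySem.Dict Int (List Nat)) (i : Nat)
    (seen : PySem.Set Nat) (systems : List (List Int)) : List (List Int) :=
  if i < rings.length then
    if seen.contains i then pvLoopB rings idx (i+1) seen systems
    else
      let r := pvDfsB rings idx (rings.length + 1) [i] (PySem.Set.add seen i) []
      pvLoopB rings idx (i+1) r.2 (systems ++ [r.1])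
  else systems
termination_by rings.length - i

def merge_fused_rings_py_alt (rings : List (List Int)) : List (List Int) :=
  (pvLoopB rings (pvIndexB rings) 0 [] []).map
    (fun s => PySem.List.sorted s (fun x => x) false)

-- ===== PRECONDITION & SPEC =====
def Spec_merge_fused_rings_py (rings : List (List Int)) (out : List (List Int)) : Prop := out = merge_fused_rings_py_alt rings
instance (rings : List (List Int)) (out : List (List Int)) : Decidable (Spec_merge_fused_rings_py rings out) := by unfold Spec_merge_fused_rings_py; infer_instance

-- ===== CLAIM (what is proved, stated in full; the proofs are below) =====
def Claim_equal_merge_fused_rings_py : Prop := ∀ (rings : List (List Int)), Dom_merge_fused_rings_py rings → Spec_merge_fused_rings_py rings (merge_fused_rings_py rings)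

-- ===== LEMMAS AND PROOFS =====
def ringN (R : List (List Int)) (j : Nat) : List Int := R.getD j []

def adjR (R : List (List Int)) (a b : Nat) : Prop :=
  a < R.length ∧ b < R.length ∧ ∃ x, x ∈ ringN R a ∧ x ∈ ringN R b

def reachR (R : List (List Int)) : Nat → Nat → Prop := Relation.ReflTransGen (adjR R)

def pvCharP (R : List (List Int)) (out : List (List Int)) : Prop :=
  ∃ hs : List Nat,
    hs.Pairwise (· < ·) ∧
    (∀ i, i ∈ hs ↔ (i < R.length ∧ ∀ j, reachR R j i → i ≤ j)) ∧
    List.Forall₂ (fun h s => s.Pairwise (· < ·) ∧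
      ∀ x : Int, (x ∈ s ↔ ∃ j, reachR R h j ∧ x ∈ ringN R j)) hs out

theorem adjR_symm (R : List (List Int)) {a b : Nat} (h : adjR R a b) : adjR R b a := by
  obtain ⟨h1, h2, x, hx1, hx2⟩ := h
  exact ⟨h2, h1, x, hx2, hx1⟩

theorem reachR_symm (R : List (List Int)) {a b : Nat} (h : reachR R a b) : reachR R b a := by
  induction h with
  | refl => exact Relation.ReflTransGen.refl
  | tail _ hadj ih =>
    exact Relation.ReflTransGen.trans (Relation.ReflTransGen.single (adjR_symm R hadj)) ih

theorem pvForall₂_mem_right {α β : Type} {P : α → β → Prop} :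
    ∀ {G : List α} {L : List β}, List.Forall₂ P G L → ∀ s ∈ L, ∃ g ∈ G, P g s := by
  intro G L h
  induction h with
  | nil => intro s hs; cases hs
  | cons hh _ ih =>
    intro s hs
    rcases List.mem_cons.mp hs with rfl | hs
    · exact ⟨_, by simp, hh⟩
    · obtain ⟨g, hg, hP⟩ := ih s hs
      exact ⟨g, by simp [hg], hP⟩

theorem pvStrictSorted_eq {α : Type} [LinearOrder α] :
    ∀ (s t : List α), s.Pairwise (· < ·) → t.Pairwise (· < ·) →
      (∀ x, x ∈ s ↔ x ∈ t) → s = t := by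
  intro s
  induction s with
  | nil =>
    intro t _ _ h
    cases t with
    | nil => rfl
    | cons b t' => exact absurd ((h b).2 (by simp)) (by simp)
  | cons a s' ih =>
    intro t hs ht h
    cases t with
    | nil => exact absurd ((h a).1 (by simp)) (by simp)
    | cons b t' =>
      have hs' := List.pairwise_cons.mp hs
      have ht' := List.pairwise_cons.mp ht
      have ha := (h a).1 (by simp)
      have hb := (h b).2 (by simp)
      simp only [List.mem_cons] at ha hb
      have hab : a = b := by
        rcases ha with h1 | h1
        · exact h1
        · rcases hb with h2 | h2
          · exact h2.symm
          · exact absurd (lt_trans (ht'.1 a h1) (hs'.1 b h2)) (lt_irrefl b)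
      subst hab
      have hst : s' = t' := by
        refine ih t' hs'.2 ht'.2 ?_
        intro x
        constructor
        · intro hx
          have hxt := (h x).1 (by simp [hx])
          simp only [List.mem_cons] at hxt
          rcases hxt with rfl | h1
          · exact absurd (hs'.1 x hx) (lt_irrefl x)
          · exact h1
        · intro hx
          have hxs := (h x).2 (by simp [hx])
          simp only [List.mem_cons] at hxs
          rcases hxs with rfl | h1
          · exact absurd (ht'.1 x hx) (lt_irrefl x)
          · exact h1
      rw [hst]

theorem pvCharP_unique (R : List (List Int)) (o₁ o₂ : List (List Int))
    (h₁ : pvCharP R o₁) (h₂ : pvCharP R o₂) : o₁ = o₂ := by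
  obtain ⟨hs₁, hp₁, hm₁, hf₁⟩ := h₁
  obtain ⟨hs₂, hp₂, hm₂, hf₂⟩ := h₂
  have hhs : hs₁ = hs₂ :=
    pvStrictSorted_eq hs₁ hs₂ hp₁ hp₂ (fun i => (hm₁ i).trans (hm₂ i).symm)
  subst hhs
  clear hp₁ hp₂ hm₁ hm₂
  induction hf₁ generalizing o₂ with
  | nil => cases hf₂; rfl
  | cons hhead htail ih =>
    cases hf₂ with
    | cons hhead₂ htail₂ =>
      have he := pvStrictSorted_eq _ _ hhead.1 hhead₂.1
        (fun x => (hhead.2 x).trans (hhead₂.2 x).symm)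
      rw [he, ih _ htail₂]

-- ===== Good invariant =====
def pvGroupOk (R : List (List Int)) (g : List Nat) (s : List Int) : Prop :=
  g ≠ [] ∧ (∀ j ∈ g, g.headD 0 ≤ j ∧ j < R.length) ∧
  (∀ j ∈ g, ∀ j' ∈ g, reachR R j j') ∧
  s.Nodup ∧ (∀ x, x ∈ s ↔ ∃ j ∈ g, x ∈ ringN R j)

def pvGood (R : List (List Int)) (L : List (List Int)) : Prop :=
  ∃ G : List (List Nat),
    List.Forall₂ (pvGroupOk R) G L ∧
    G.flatten.Nodup ∧
    (∀ j, j ∈ G.flatten ↔ j < R.length) ∧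
    (G.map (·.headD 0)).Pairwise (· < ·)

theorem pvGood_nodup_entries (R : List (List Int)) (L : List (List Int))
    (h : pvGood R L) : ∀ s ∈ L, s.Nodup := by
  obtain ⟨G, hf, -, -, -⟩ := h
  intro s hsmem
  obtain ⟨g, -, hok⟩ := pvForall₂_mem_right hf s hsmem
  exact hok.2.2.2.1

theorem pvForall₂_split {α β : Type} {P : α → β → Prop} :
    ∀ {l₁ : List β} {x : β} {l₂ : List β} {G : List α},
      List.Forall₂ P G (l₁ ++ x :: l₂) →
      ∃ G₁ g G₂, G = G₁ ++ g :: G₂ ∧ List.Forall₂ P G₁ l₁ ∧ P g x ∧ List.Forall₂ P G₂ l₂ := by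
  intro l₁
  induction l₁ with
  | nil =>
    intro x l₂ G h
    simp only [List.nil_append] at h
    cases h with
    | cons hh ht => exact ⟨[], _, _, rfl, List.Forall₂.nil, hh, ht⟩
  | cons y l₁' ih =>
    intro x l₂ G h
    simp only [List.cons_append] at h
    cases h with
    | cons hh ht =>
      obtain ⟨G₁, g, G₂, rfl, hf₁, hg, hf₂⟩ := ih ht
      exact ⟨_ :: G₁, g, G₂, rfl, List.Forall₂.cons hh hf₁, hg, hf₂⟩

theorem pvHeadD_append {g t : List Nat} (h : g ≠ []) : (g ++ t).headD 0 = g.headD 0 := by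
  cases g with
  | nil => exact absurd rfl h
  | cons a g' => rfl


theorem pvForall₂_append {α β : Type} {P : α → β → Prop} :
    ∀ {l₁ : List α} {m₁ : List β} {l₂ : List α} {m₂ : List β},
      List.Forall₂ P l₁ m₁ → List.Forall₂ P l₂ m₂ → List.Forall₂ P (l₁ ++ l₂) (m₁ ++ m₂) := by
  intro l₁ m₁ l₂ m₂ h₁ h₂
  induction h₁ with
  | nil => exact h₂
  | cons hh _ ih => exact List.Forall₂.cons hh ih

theorem pvGroupOk_merge (R : List (List Int)) {gs gt : List Nat} {s t u : List Int}
    (hs : pvGroupOk R gs s) (ht : pvGroupOk R gt t)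
    (hlt : gs.headD 0 < gt.headD 0)
    (hov : ∃ x, x ∈ s ∧ x ∈ t) (hu : u.Nodup) (hmem : ∀ x, x ∈ u ↔ x ∈ s ∨ x ∈ t) :
    pvGroupOk R (gs ++ gt) u := by
  obtain ⟨hsne, hsbd, hsreach, -, hsmem⟩ := hs
  obtain ⟨htne, htbd, htreach, -, htmem⟩ := ht
  obtain ⟨x, hxs, hxt⟩ := hov
  obtain ⟨j₁, hj₁, hxj₁⟩ := (hsmem x).mp hxs
  obtain ⟨j₂, hj₂, hxj₂⟩ := (htmem x).mp hxt
  have hadj : adjR R j₁ j₂ := ⟨(hsbd j₁ hj₁).2, (htbd j₂ hj₂).2, x, hxj₁, hxj₂⟩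
  have hcross : ∀ a ∈ gs, ∀ b ∈ gt, reachR R a b := by
    intro a ha b hb
    exact Relation.ReflTransGen.trans (hsreach a ha j₁ hj₁)
      (Relation.ReflTransGen.trans (Relation.ReflTransGen.single hadj) (htreach j₂ hj₂ b hb))
  refine ⟨by simp [hsne], ?_, ?_, hu, ?_⟩
  · intro j hj
    rw [pvHeadD_append hsne]
    rcases List.mem_append.mp hj with hj | hj
    · exact hsbd j hj
    · exact ⟨le_trans (le_of_lt hlt) (htbd j hj).1, (htbd j hj).2⟩
  · intro a ha b hb
    rcases List.mem_append.mp ha with ha | ha <;> rcases List.mem_append.mp hb with hb | hb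
    · exact hsreach a ha b hb
    · exact hcross a ha b hb
    · exact reachR_symm R (hcross b hb a ha)
    · exact htreach a ha b hb
  · intro y
    rw [hmem y, hsmem y, htmem y]
    constructor
    · rintro (⟨j, hj, hy⟩ | ⟨j, hj, hy⟩)
      · exact ⟨j, List.mem_append.mpr (Or.inl hj), hy⟩
      · exact ⟨j, List.mem_append.mpr (Or.inr hj), hy⟩
    · rintro ⟨j, hj, hy⟩
      rcases List.mem_append.mp hj with hj | hj
      · exact Or.inl ⟨j, hj, hy⟩
      · exact Or.inr ⟨j, hj, hy⟩

theorem pvGood_merge (R : List (List Int)) (pre mid post : List (List Int))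
    (s t u : List Int)
    (hg : pvGood R (pre ++ s :: (mid ++ t :: post)))
    (hov : ∃ x, x ∈ s ∧ x ∈ t) (hu : u.Nodup) (hmem : ∀ x, x ∈ u ↔ x ∈ s ∨ x ∈ t) :
    pvGood R (pre ++ u :: (mid ++ post)) := by
  obtain ⟨G, hf, hnd, hcov, hheads⟩ := hg
  obtain ⟨Gp, gs, Grest, rfl, hfp, hgs, hfrest⟩ := pvForall₂_split (l₁ := pre) (x := s) (l₂ := mid ++ t :: post) hf
  obtain ⟨Gm, gt, Gq, rfl, hfm, hgt, hfq⟩ := pvForall₂_split hfrest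
  have hsne : gs ≠ [] := hgs.1
  have hgtne : gt ≠ [] := hgt.1
  -- head gs < head gt
  have hlt : gs.headD 0 < gt.headD 0 := by
    have := hheads
    simp only [List.map_append, List.map_cons] at this
    have h2 := (List.pairwise_append.mp this).2.1
    have h3 := (List.pairwise_cons.mp h2).1
    exact h3 (gt.headD 0) (by simp)
  have hok := pvGroupOk_merge R hgs hgt hlt hov hu hmem
  refine ⟨Gp ++ (gs ++ gt) :: (Gm ++ Gq), ?_, ?_, ?_, ?_⟩
  · exact pvForall₂_append hfp (List.Forall₂.cons hok (pvForall₂_append hfm hfq))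
  · refine List.Perm.nodup ?_ hnd
    rw [List.perm_iff_count]
    intro a
    simp only [List.flatten_append, List.flatten_cons, List.count_append]
    omega
  · intro j
    rw [← hcov j]
    simp only [List.flatten_append, List.flatten_cons, List.mem_append]
    tauto
  · have hsub : ((Gp ++ (gs ++ gt) :: (Gm ++ Gq)).map (·.headD 0)).Sublist
        ((Gp ++ gs :: (Gm ++ gt :: Gq)).map (·.headD 0)) := by
      rw [List.map_append, List.map_cons, List.map_append,
          List.map_append, List.map_cons, List.map_append, List.map_cons,
          pvHeadD_append hsne]
      refine List.Sublist.append_left ?_ _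
      refine List.Sublist.cons₂ _ ?_
      refine List.Sublist.append_left ?_ _
      exact List.sublist_cons_self _ _
    exact List.Pairwise.sublist hsub hheads
theorem pvRingN_eq (R : List (List Int)) (i : Nat) (h : i < R.length) :
    ringN R i = R[i] := by
  simp [ringN, List.getD_eq_getElem?_getD, List.getElem?_eq_getElem h]

-- phase1 Good
theorem pvFlatten_singletons : ∀ l : List Nat, (l.map (fun j => [j])).flatten = l := by
  intro l; induction l with
  | nil => rfl
  | cons a l ih => simp [ih]

theorem pvGood_init (R : List (List Int)) : pvGood R (R.map PySem.Set.ofList) := by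
  refine ⟨(List.range R.length).map (fun j => [j]), ?_, ?_, ?_, ?_⟩
  · rw [List.forall₂_iff_get]
    refine ⟨by simp, ?_⟩
    intro i h₁ h₂
    simp only [List.get_eq_getElem, List.getElem_map, List.getElem_range]
    have hi : i < R.length := by simpa using h₂
    refine ⟨by simp, by simp [hi], ?_, PySem.Set.nodup_ofList _, ?_⟩
    · intro j hj j' hj'
      simp only [List.mem_singleton] at hj hj'
      subst hj; subst hj'
      exact Relation.ReflTransGen.refl
    · intro x
      simp only [PySem.Set.mem_ofList, List.mem_singleton]
      constructor
      · intro hx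
        exact ⟨i, rfl, by rw [pvRingN_eq R i hi]; exact hx⟩
      · rintro ⟨j, rfl, hx⟩
        rw [pvRingN_eq R j hi] at hx
        exact hx
  · rw [pvFlatten_singletons]
    exact List.nodup_range
  · intro j
    rw [pvFlatten_singletons]
    exact List.mem_range
  · rw [List.map_map,
      show ((fun x : List Nat => x.headD 0) ∘ fun j : Nat => [j]) = id from rfl,
      List.map_id]
    exact List.pairwise_lt_range

theorem pvFirstMergeA_some (ring : List Int) :
    ∀ {systems out : List (List Int)}, pvFirstMergeA ring systems = some out →
      ∃ pre s rest, systems = pre ++ s :: rest ∧ PySem.Set.inter ring s ≠ [] ∧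
        out = pre ++ PySem.Set.update s ring :: rest := by
  intro systems
  induction systems with
  | nil => intro out h; simp [pvFirstMergeA] at h
  | cons s0 rest ih =>
    intro out h
    by_cases hc : PySem.Set.inter ring s0 ≠ []
    · rw [pvFirstMergeA, if_pos hc] at h
      cases h
      exact ⟨[], s0, rest, rfl, hc, rfl⟩
    · rw [pvFirstMergeA, if_neg hc] at h
      cases hrec : pvFirstMergeA ring rest with
      | none => rw [hrec] at h; simp at h
      | some out' =>
        rw [hrec] at h
        simp only [Option.map_some] at h
        obtain ⟨pre, s, rest', heq, hov, hout⟩ := ih hrec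
        exact ⟨s0 :: pre, s, rest', by simp [heq], hov,
          by rw [← Option.some.inj h, hout]; simp⟩

theorem pvInter_ne_nil {s t : List Int} (h : PySem.Set.inter s t ≠ []) :
    ∃ x, x ∈ s ∧ x ∈ t := by
  obtain ⟨x, hx⟩ := List.exists_mem_of_ne_nil _ h
  exact ⟨x, (PySem.Set.mem_inter _ _ _).mp hx⟩

theorem pvPhase1_fold_good (R : List (List Int)) :
    ∀ (pending : List (List Int)) (systems : List (List Int)),
      pvGood R (systems ++ pending.map PySem.Set.ofList) →
      pvGood R (pending.foldl pvStep1A systems) := by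
  intro pending
  induction pending with
  | nil => intro systems h; simpa using h
  | cons ring pending' ih =>
    intro systems h
    rw [List.foldl_cons]
    refine ih _ ?_
    unfold pvStep1A
    cases hm : pvFirstMergeA ring systems with
    | none =>
      simp only []
      have : systems ++ [PySem.Set.ofList ring] ++ pending'.map PySem.Set.ofList
          = systems ++ (ring :: pending').map PySem.Set.ofList := by simp
      rw [this]
      exact h
    | some out =>
      simp only []
      obtain ⟨pre, s, rest, rfl, hov, rfl⟩ := pvFirstMergeA_some ring hm
      have hnd : s.Nodup := by
        refine pvGood_nodup_entries R _ h s ?_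
        simp
      obtain ⟨x, hx1, hx2⟩ := pvInter_ne_nil hov
      have hmerge := pvGood_merge R pre rest (pending'.map PySem.Set.ofList) s
        (PySem.Set.ofList ring) (PySem.Set.update s ring)
        (by
          have : (pre ++ s :: rest) ++ (ring :: pending').map PySem.Set.ofList
              = pre ++ s :: (rest ++ PySem.Set.ofList ring :: pending'.map PySem.Set.ofList) := by
            simp
          rw [← this]
          exact h)
        ⟨x, hx2, by simpa [PySem.Set.mem_ofList] using hx1⟩
        (PySem.Set.nodup_update _ ring hnd)
        (by intro y; simp [PySem.Set.mem_update, PySem.Set.mem_ofList])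
      have : pre ++ PySem.Set.update s ring :: (rest ++ pending'.map PySem.Set.ofList)
          = (pre ++ PySem.Set.update s ring :: rest) ++ pending'.map PySem.Set.ofList := by
        simp
      rw [this] at hmerge
      exact hmerge

theorem pvPhase1A_good (R : List (List Int)) : pvGood R (pvPhase1A R) := by
  unfold pvPhase1A
  refine pvPhase1_fold_good R R [] ?_
  simpa using pvGood_init R
-- ===== phase 2: the while/pass loops =====
def pvTailL (sys : List (List Int)) (used : PySem.Set Nat) (j : Nat) : List (List Int) :=
  ((List.range' j (sys.length - j)).filter (fun t => !(used.contains t))).map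
    (fun t => sys.getD t [])

def pvDisj (sys : List (List Int)) : Prop :=
  ∀ a b, a < b → b < sys.length →
    PySem.Set.inter (sys.getD a []) (sys.getD b []) = []

theorem pvContains_iff (used : PySem.Set Nat) (t : Nat) :
    used.contains t = true ↔ t ∈ used := by
  simp

theorem pvRange'_cons (j n : Nat) (h : j < n) :
    List.range' j (n - j) = j :: List.range' (j+1) (n - (j+1)) := by
  have h2 : n - j = (n - (j+1)) + 1 := by omega
  rw [h2, List.range'_succ]

theorem pvTailL_cons (sys : List (List Int)) (used : PySem.Set Nat) (j : Nat)
    (hj : j < sys.length) (h : used.contains j = false) :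
    pvTailL sys used j = sys.getD j [] :: pvTailL sys used (j+1) := by
  unfold pvTailL
  rw [pvRange'_cons j sys.length hj, List.filter_cons, h]
  simp

theorem pvTailL_skip (sys : List (List Int)) (used : PySem.Set Nat) (j : Nat)
    (h : used.contains j = true) :
    pvTailL sys used j = pvTailL sys used (j+1) := by
  by_cases hj : j < sys.length
  · unfold pvTailL
    rw [pvRange'_cons j sys.length hj, List.filter_cons, h]
    simp
  · unfold pvTailL
    have h1 : sys.length - j = 0 := by omega
    have h2 : sys.length - (j+1) = 0 := by omega
    rw [h1, h2]
    simp

theorem pvTailL_congr (sys : List (List Int)) (used used' : PySem.Set Nat) (j : Nat)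
    (h : ∀ t, j ≤ t → (t ∈ used ↔ t ∈ used')) :
    pvTailL sys used j = pvTailL sys used' j := by
  unfold pvTailL
  congr 1
  refine List.filter_congr ?_
  intro t ht
  have hjt : j ≤ t := (List.mem_range'_1.mp ht).1
  have hiff := h t hjt
  by_cases hmem : t ∈ used
  · simp [hmem, hiff.mp hmem]
  · have hmem' : t ∉ used' := fun hc => hmem (hiff.mpr hc)
    simp [hmem, hmem']

theorem pvMap_getD_range (sys : List (List Int)) :
    (List.range sys.length).map (fun t => sys.getD t []) = sys := by
  refine List.ext_getElem (by simp) ?_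
  intro i h1 h2
  simp [List.getD_eq_getElem?_getD, List.getElem?_eq_getElem h2]

theorem pvTailL_all (sys : List (List Int)) : pvTailL sys [] 0 = sys := by
  unfold pvTailL
  rw [Nat.sub_zero, ← List.range_eq_range']
  have hf : (List.range sys.length).filter (fun t => !(PySem.Set.contains ([] : PySem.Set Nat) t))
      = List.range sys.length := by
    refine List.filter_eq_self.mpr ?_
    intro t _
    rfl
  rw [hf, pvMap_getD_range]


theorem pvFilterLen_mono (p q : Nat → Bool) :
    ∀ (l : List Nat), (∀ t ∈ l, q t = true → p t = true) →
      (l.filter q).length ≤ (l.filter p).length := by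
  intro l
  induction l with
  | nil => intro _; simp
  | cons a l ih =>
    intro h
    have ht := ih (fun t htl => h t (by simp [htl]))
    simp only [List.filter_cons]
    by_cases hq : q a = true
    · rw [if_pos hq, if_pos (h a (by simp) hq)]
      simpa using ht
    · rw [if_neg hq]
      split
      · simp only [List.length_cons]
        omega
      · exact ht

theorem pvFilterLen_strict (p q : Nat → Bool) :
    ∀ (l : List Nat), (∀ t ∈ l, q t = true → p t = true) →
      (∃ t ∈ l, p t = true ∧ q t = false) →
      (l.filter q).length < (l.filter p).length := by
  intro l
  induction l with
  | nil => rintro _ ⟨t, ht, -⟩; cases ht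
  | cons a l ih =>
    rintro h ⟨t, htl, hpt, hqt⟩
    simp only [List.filter_cons]
    rcases List.mem_cons.mp htl with rfl | htl'
    · rw [if_neg (by simp [hqt]), if_pos hpt]
      have hm := pvFilterLen_mono p q l (fun u hul => h u (by simp [hul]))
      simp only [List.length_cons]
      omega
    · have hstrict := ih (fun u hul => h u (by simp [hul])) ⟨t, htl', hpt, hqt⟩
      by_cases hq : q a = true
      · rw [if_pos hq, if_pos (h a (by simp) hq)]
        simpa using hstrict
      · rw [if_neg hq]
        split
        · simp only [List.length_cons]
          omega
        · exact hstrict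

theorem pvBool_false {b : Bool} (h : ¬ b = true) : b = false := by
  cases b
  · rfl
  · exact absurd rfl h

theorem pvTailL_len_mono (sys : List (List Int)) (used used' : PySem.Set Nat) (c : Nat)
    (h : ∀ t, t ∈ used → t ∈ used') :
    (pvTailL sys used' c).length ≤ (pvTailL sys used c).length := by
  unfold pvTailL
  simp only [List.length_map]
  refine pvFilterLen_mono _ _ _ ?_
  intro t _ hq
  have h1 : t ∉ used' := by
    intro hc
    rw [(pvContains_iff used' t).mpr hc] at hq
    cases hq
  have h2 : PySem.Set.contains used t = false :=
    pvBool_false (fun hc => h1 (h t ((pvContains_iff used t).mp hc)))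
  rw [h2]
  rfl

theorem pvTailL_len_strict (sys : List (List Int)) (used used' : PySem.Set Nat) (c : Nat)
    (h : ∀ t, t ∈ used → t ∈ used')
    (hex : ∃ t, t ∈ used' ∧ t ∉ used ∧ c ≤ t ∧ t < sys.length) :
    (pvTailL sys used' c).length < (pvTailL sys used c).length := by
  unfold pvTailL
  simp only [List.length_map]
  obtain ⟨t, ht1, ht2, ht3, ht4⟩ := hex
  refine pvFilterLen_strict _ _ _ ?_ ⟨t, List.mem_range'_1.mpr ⟨ht3, by omega⟩, ?_, ?_⟩
  · intro u _ hq
    have h1 : u ∉ used' := by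
      intro hc
      rw [(pvContains_iff used' u).mpr hc] at hq
      cases hq
    have h2 : PySem.Set.contains used u = false :=
      pvBool_false (fun hc => h1 (h u ((pvContains_iff used u).mp hc)))
    rw [h2]
    rfl
  · rw [pvBool_false (fun hc => ht2 ((pvContains_iff used t).mp hc))]
    rfl
  · rw [(pvContains_iff used' t).mpr ht1]
    rfl


theorem pvInnerA_spec (R : List (List Int)) (sys : List (List Int)) :
    ∀ (k : Nat) (j : Nat), sys.length - j ≤ k →
      ∀ (s1 : List Int) (used : PySem.Set Nat) (ch : Bool) (s1' : List Int)
        (used' : PySem.Set Nat) (ch' : Bool),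
      pvInnerA sys s1 j used ch = (s1', used', ch') →
      (∀ t, t ∈ used → t ∈ used') ∧
      (∀ t, t ∈ used' → t ∈ used ∨ (j ≤ t ∧ t < sys.length)) ∧
      (ch = true → ch' = true) ∧
      (ch' = false → ch = false ∧ s1' = s1 ∧ used' = used ∧
        ∀ t, j ≤ t → t < sys.length → PySem.Set.contains used t = false →
          PySem.Set.inter s1 (sys.getD t []) = []) ∧
      (∀ pre mid, pvGood R (pre ++ s1 :: (mid ++ pvTailL sys used j)) →
        pvGood R (pre ++ s1' :: (mid ++ pvTailL sys used' j))) ∧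
      (ch = false → ch' = true → ∃ t, t ∈ used' ∧ t ∉ used ∧ j ≤ t ∧ t < sys.length) := by
  intro k
  induction k with
  | zero =>
    intro j hj s1 used ch s1' used' ch' heq
    have hge : ¬ j < sys.length := by omega
    unfold pvInnerA at heq
    rw [if_neg hge] at heq
    simp only [Prod.mk.injEq] at heq
    obtain ⟨rfl, rfl, rfl⟩ := heq
    refine ⟨fun t ht => ht, fun t ht => Or.inl ht, fun h => h, ?_, fun pre mid hg => hg, ?_⟩
    · intro h
      exact ⟨h, rfl, rfl, fun t h1 h2 _ => absurd h2 (by omega)⟩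
    · intro h1 h2
      rw [h1] at h2
      cases h2
  | succ k ih =>
    intro j hj s1 used ch s1' used' ch' heq
    by_cases hlt : j < sys.length
    · unfold pvInnerA at heq
      rw [if_pos hlt] at heq
      by_cases hused : PySem.Set.contains used j = true
      · rw [if_pos hused] at heq
        obtain ⟨C1, C2, C3, C4, C5, C6⟩ := ih (j+1) (by omega) _ _ _ _ _ _ heq
        have hjmem : j ∈ used := (pvContains_iff used j).mp hused
        refine ⟨C1, fun t ht => (C2 t ht).imp id (fun hh => ⟨by omega, hh.2⟩), C3, ?_, ?_, ?_⟩
        · intro h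
          obtain ⟨h1, h2, h3, h4⟩ := C4 h
          refine ⟨h1, h2, h3, ?_⟩
          intro t ht1 ht2 ht3
          rcases Nat.eq_or_lt_of_le ht1 with rfl | htgt
          · exact absurd ((pvContains_iff used j).mpr hjmem) (by rw [ht3]; simp)
          · exact h4 t (by omega) ht2 ht3
        · intro pre mid hg
          rw [pvTailL_skip sys used j hused] at hg
          have := C5 pre mid hg
          rw [← pvTailL_skip sys used' j ((pvContains_iff used' j).mpr (C1 j hjmem))] at this
          exact this
        · intro h1 h2
          obtain ⟨t, ht1, ht2, ht3, ht4⟩ := C6 h1 h2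
          exact ⟨t, ht1, ht2, by omega, ht4⟩
      · have husedf := pvBool_false hused
        have hjnot : j ∉ used := fun hc => hused ((pvContains_iff used j).mpr hc)
        rw [if_neg hused] at heq
        by_cases hov : PySem.Set.inter s1 (sys.getD j []) ≠ []
        · rw [if_pos hov] at heq
          obtain ⟨C1, C2, C3, C4, C5, C6⟩ := ih (j+1) (by omega) _ _ _ _ _ _ heq
          have hch' : ch' = true := C3 rfl
          have hjused' : j ∈ used' := C1 j (by simp [PySem.Set.mem_add])
          refine ⟨?_, ?_, fun _ => hch', ?_, ?_, ?_⟩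
          · intro t ht
            exact C1 t (by simp [PySem.Set.mem_add, ht])
          · intro t ht
            rcases C2 t ht with hh | hh
            · rcases (PySem.Set.mem_add _ _ _).mp hh with hh' | rfl
              · exact Or.inl hh'
              · exact Or.inr ⟨le_refl _, hlt⟩
            · exact Or.inr ⟨by omega, hh.2⟩
          · intro h
            rw [h] at hch'
            cases hch'
          · intro pre mid hg
            rw [pvTailL_cons sys used j hlt husedf] at hg
            have hs1nd : s1.Nodup :=
              pvGood_nodup_entries R _ hg s1 (by simp)
            obtain ⟨x, hx1, hx2⟩ := pvInter_ne_nil hov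
            have hmerged := pvGood_merge R pre mid (pvTailL sys used (j+1)) s1
              (sys.getD j []) (PySem.Set.update s1 (sys.getD j [])) hg
              ⟨x, hx1, hx2⟩ (PySem.Set.nodup_update _ _ hs1nd)
              (fun y => by simp [PySem.Set.mem_update])
            have hteq : pvTailL sys used (j+1) = pvTailL sys (PySem.Set.add used j) (j+1) := by
              refine pvTailL_congr sys used _ (j+1) ?_
              intro t ht
              simp only [PySem.Set.mem_add]
              constructor
              · exact Or.inl
              · rintro (h | rfl)
                · exact h
                · omega
            rw [hteq] at hmerged
            have := C5 pre mid hmerged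
            rw [← pvTailL_skip sys used' j ((pvContains_iff used' j).mpr hjused')] at this
            exact this
          · intro h1 h2
            exact ⟨j, hjused', hjnot, le_refl _, hlt⟩
        · rw [if_neg hov] at heq
          obtain ⟨C1, C2, C3, C4, C5, C6⟩ := ih (j+1) (by omega) _ _ _ _ _ _ heq
          have hjnotused' : j ∉ used' := by
            intro hc
            rcases C2 j hc with hh | hh
            · exact hjnot hh
            · omega
          refine ⟨C1, fun t ht => (C2 t ht).imp id (fun hh => ⟨by omega, hh.2⟩), C3, ?_, ?_, ?_⟩
          · intro h
            obtain ⟨h1, h2, h3, h4⟩ := C4 h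
            refine ⟨h1, h2, h3, ?_⟩
            intro t ht1 ht2 ht3
            rcases Nat.eq_or_lt_of_le ht1 with rfl | htgt
            · exact not_not.mp hov
            · exact h4 t (by omega) ht2 ht3
          · intro pre mid hg
            rw [pvTailL_cons sys used j hlt husedf] at hg
            have hg' : pvGood R (pre ++ s1 :: ((mid ++ [sys.getD j []]) ++ pvTailL sys used (j+1))) := by
              simpa [List.append_assoc] using hg
            have := C5 pre (mid ++ [sys.getD j []]) hg'
            have hres : pvGood R (pre ++ s1' :: (mid ++ (sys.getD j [] :: pvTailL sys used' (j+1)))) := by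
              simpa [List.append_assoc] using this
            rw [← pvTailL_cons sys used' j hlt (pvBool_false
              (fun hc => hjnotused' ((pvContains_iff used' j).mp hc)))] at hres
            exact hres
          · intro h1 h2
            obtain ⟨t, ht1, ht2, ht3, ht4⟩ := C6 h1 h2
            exact ⟨t, ht1, ht2, by omega, ht4⟩
    · unfold pvInnerA at heq
      rw [if_neg hlt] at heq
      simp only [Prod.mk.injEq] at heq
      obtain ⟨rfl, rfl, rfl⟩ := heq
      refine ⟨fun t ht => ht, fun t ht => Or.inl ht, fun h => h, ?_, fun pre mid hg => hg, ?_⟩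
      · intro h
        exact ⟨h, rfl, rfl, fun t h1 h2 _ => absurd h2 (by omega)⟩
      · intro h1 h2
        rw [h1] at h2
        cases h2

theorem pvTailL_ge (sys : List (List Int)) (used : PySem.Set Nat) (j : Nat)
    (h : sys.length ≤ j) : pvTailL sys used j = [] := by
  unfold pvTailL
  have h0 : sys.length - j = 0 := by omega
  rw [h0]
  simp

theorem pvOuterA_spec (R : List (List Int)) (sys : List (List Int)) :
    ∀ (k i : Nat), sys.length - i ≤ k →
      ∀ (used : PySem.Set Nat) (acc : List (List Int)) (ch : Bool)
        (out : List (List Int)) (ch' : Bool),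
      pvOuterA sys i used acc ch = (out, ch') →
      (pvGood R (acc ++ pvTailL sys used i) → pvGood R out) ∧
      (ch = true → ch' = true) ∧
      (ch' = false → ch = false ∧ out = acc ++ pvTailL sys used i ∧
        (∀ a b, i ≤ a → a < b → b < sys.length → PySem.Set.contains used a = false →
          PySem.Set.contains used b = false →
          PySem.Set.inter (sys.getD a []) (sys.getD b []) = [])) ∧
      (out.length ≤ acc.length + (pvTailL sys used i).length) ∧
      (ch = false → ch' = true → out.length < acc.length + (pvTailL sys used i).length) := by
  intro k
  induction k with
  | zero =>
    intro i hi used acc ch out ch' heq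
    have hge : ¬ i < sys.length := by omega
    unfold pvOuterA at heq
    rw [if_neg hge] at heq
    simp only [Prod.mk.injEq] at heq
    obtain ⟨rfl, rfl⟩ := heq
    rw [pvTailL_ge sys used i (by omega)]
    refine ⟨by simp, fun h => h, ?_, by simp, ?_⟩
    · intro h
      exact ⟨h, by simp, fun a b h1 h2 h3 _ _ => absurd h1 (by omega)⟩
    · intro h1 h2
      rw [h1] at h2
      cases h2
  | succ k ih =>
    intro i hi used acc ch out ch' heq
    by_cases hlt : i < sys.length
    · unfold pvOuterA at heq
      rw [if_pos hlt] at heq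
      by_cases hused : PySem.Set.contains used i = true
      · rw [if_pos hused] at heq
        obtain ⟨G1, G2, G3, G4, G5⟩ := ih (i+1) (by omega) _ _ _ _ _ heq
        rw [pvTailL_skip sys used i hused]
        refine ⟨G1, G2, ?_, G4, G5⟩
        · intro h
          obtain ⟨h1, h2, h3⟩ := G3 h
          refine ⟨h1, h2, ?_⟩
          intro a b ha1 ha2 ha3 ha4 ha5
          rcases Nat.eq_or_lt_of_le ha1 with rfl | hgt
          · exact absurd hused (by rw [ha4]; simp)
          · exact h3 a b (by omega) ha2 ha3 ha4 ha5
      · have husedf := pvBool_false hused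
        rw [if_neg hused] at heq
        simp only [] at heq
        cases hr : pvInnerA sys (sys.getD i []) (i+1) used ch with
        | mk s1' p =>
          cases p with
          | mk usedI chI =>
            rw [hr] at heq
            simp only [] at heq
            obtain ⟨I1, I2, I3, I4, I5, I6⟩ :=
              pvInnerA_spec R sys (sys.length - (i+1)) (i+1) (by omega) _ _ _ _ _ _ hr
            obtain ⟨G1, G2, G3, G4, G5⟩ := ih (i+1) (by omega) _ _ _ _ _ heq
            have htcons := pvTailL_cons sys used i hlt husedf
            have hlen_cons : (pvTailL sys used i).length = 1 + (pvTailL sys used (i+1)).length := by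
              rw [htcons]; simp; omega
            refine ⟨?_, ?_, ?_, ?_, ?_⟩
            · intro hg
              rw [htcons] at hg
              have hg2 := I5 acc [] (by simpa using hg)
              refine G1 ?_
              simpa [List.append_assoc] using hg2
            · intro h
              exact G2 (I3 h)
            · intro h
              obtain ⟨hchI, hout, hpairs⟩ := G3 h
              obtain ⟨hch, hs1, husedEq, hdisj⟩ := I4 hchI
              rw [husedEq] at hout hpairs
              rw [hs1] at hout
              refine ⟨hch, ?_, ?_⟩
              · rw [hout, htcons]
                simp
              · intro a b ha1 ha2 ha3 ha4 ha5
                rcases Nat.eq_or_lt_of_le ha1 with rfl | hgt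
                · exact hdisj b (by omega) ha3 ha5
                · exact hpairs a b (by omega) ha2 ha3 ha4 ha5
            · have hmono : (pvTailL sys usedI (i+1)).length ≤ (pvTailL sys used (i+1)).length :=
                pvTailL_len_mono sys used usedI (i+1) I1
              calc out.length ≤ (acc ++ [s1']).length + (pvTailL sys usedI (i+1)).length := G4
                _ ≤ acc.length + 1 + (pvTailL sys used (i+1)).length := by
                    simp only [List.length_append, List.length_cons, List.length_nil]
                    omega
                _ = acc.length + (pvTailL sys used i).length := by omega
            · intro h1 h2
              cases hchI : chI with
              | true =>
                obtain ⟨t, ht1, ht2, ht3, ht4⟩ := I6 h1 hchI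
                have hstrict : (pvTailL sys usedI (i+1)).length < (pvTailL sys used (i+1)).length :=
                  pvTailL_len_strict sys used usedI (i+1) I1 ⟨t, ht1, ht2, ht3, ht4⟩
                calc out.length ≤ (acc ++ [s1']).length + (pvTailL sys usedI (i+1)).length := G4
                  _ < acc.length + 1 + (pvTailL sys used (i+1)).length := by
                      simp only [List.length_append, List.length_cons, List.length_nil]
                      omega
                  _ = acc.length + (pvTailL sys used i).length := by omega
              | false =>
                obtain ⟨-, -, husedEq, -⟩ := I4 hchI
                have hlt2 := G5 hchI h2
                rw [husedEq] at hlt2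
                calc out.length < (acc ++ [s1']).length + (pvTailL sys used (i+1)).length := hlt2
                  _ = acc.length + (pvTailL sys used i).length := by
                      simp only [List.length_append, List.length_cons, List.length_nil]
                      omega
    · unfold pvOuterA at heq
      rw [if_neg hlt] at heq
      simp only [Prod.mk.injEq] at heq
      obtain ⟨rfl, rfl⟩ := heq
      rw [pvTailL_ge sys used i (by omega)]
      refine ⟨by simp, fun h => h, ?_, by simp, ?_⟩
      · intro h
        exact ⟨h, by simp, fun a b h1 h2 h3 _ _ => absurd h1 (by omega)⟩
      · intro h1 h2
        rw [h1] at h2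
        cases h2

theorem pvWhileA_spec (R : List (List Int)) :
    ∀ (fuel : Nat) (sys : List (List Int)), pvGood R sys → sys.length < fuel →
      pvGood R (pvWhileA sys fuel) ∧ pvDisj (pvWhileA sys fuel) := by
  intro fuel
  induction fuel with
  | zero => intro sys _ h; omega
  | succ fuel ih =>
    intro sys hg hlen
    cases hr : pvOuterA sys 0 [] [] false with
    | mk out chB =>
      obtain ⟨G1, -, G3, -, G5⟩ :=
        pvOuterA_spec R sys sys.length 0 (by omega) [] [] false out chB hr
      have hgood_out : pvGood R out := by
        refine G1 ?_
        rw [pvTailL_all sys]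
        simpa using hg
      have hwh : pvWhileA sys (fuel+1) = if chB then pvWhileA out fuel else out := by
        show (let r := pvOuterA sys 0 [] [] false
              if r.2 then pvWhileA r.1 fuel else r.1) = _
        rw [hr]
      cases chB with
      | true =>
        rw [hwh, if_pos rfl]
        have hshrink : out.length < sys.length := by
          have := G5 rfl rfl
          rw [pvTailL_all sys] at this
          simpa using this
        exact ih out hgood_out (by omega)
      | false =>
        rw [hwh, if_neg (by simp)]
        obtain ⟨-, hout, hpairs⟩ := G3 rfl
        rw [pvTailL_all sys] at hout
        simp only [List.nil_append] at hout
        subst hout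
        refine ⟨hgood_out, ?_⟩
        intro a b hab hb
        exact hpairs a b (Nat.zero_le a) hab hb rfl rfl

theorem pvHeadD_mem {g : List Nat} (h : g ≠ []) : g.headD 0 ∈ g := by
  cases g with
  | nil => exact absurd rfl h
  | cons a g' => simp

theorem pvGood_length_le (R : List (List Int)) (L : List (List Int))
    (h : pvGood R L) : L.length ≤ R.length := by
  obtain ⟨G, hf, hnd, hcov, -⟩ := h
  have hlen : G.length = L.length := hf.length_eq
  have hflat : G.flatten.length = R.length := by
    have hperm : G.flatten.Perm (List.range R.length) := by
      refine (List.perm_ext_iff_of_nodup hnd List.nodup_range).mpr ?_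
      intro a
      rw [hcov a, List.mem_range]
    simpa using hperm.length_eq
  have hne : ∀ g ∈ G, g ≠ [] := by
    intro g hgmem
    have := pvForall₂_mem_right (hf.flip) g hgmem
    obtain ⟨s, -, hok⟩ := this
    exact hok.1
  have : G.length ≤ G.flatten.length := by
    clear hf hlen hflat hnd hcov
    induction G with
    | nil => simp
    | cons g G ihG =>
      have h1 := hne g (by simp)
      have h2 := ihG (fun g' hg' => hne g' (by simp [hg']))
      have h3 : 1 ≤ g.length := by
        cases g with
        | nil => exact absurd rfl h1
        | cons _ _ => simp
      simp only [List.flatten_cons, List.length_cons, List.length_append]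
      omega
  omega

theorem pvGood_disj_char (R : List (List Int)) (L : List (List Int))
    (hgood : pvGood R L) (hdisj : pvDisj L) :
    pvCharP R (L.map (fun s => PySem.List.sorted s (fun x => x) false)) := by
  obtain ⟨G, hf, hnd, hcov, hheads⟩ := hgood
  have hlen : G.length = L.length := hf.length_eq
  have hok : ∀ (k : Nat) (hk : k < G.length), pvGroupOk R G[k] (L[k]'(by omega)) := by
    intro k hk
    have := (List.forall₂_iff_get.mp hf).2 k hk (by omega)
    simpa using this
  -- pairwise disjoint groups from flatten-nodup
  have hpd : ∀ (k k' : Nat) (hk : k < G.length) (hk' : k' < G.length), k ≠ k' →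
      ∀ b, b ∈ G[k] → b ∈ G[k'] → False := by
    intro k k' hk hk' hne b hb hb'
    have hnodup := (List.nodup_flatten.mp hnd).2
    rcases Nat.lt_or_ge k k' with hlt | hge
    · have := (List.pairwise_iff_getElem.mp hnodup) k k' hk hk' hlt
      exact this hb hb'
    · have hlt : k' < k := by omega
      have := (List.pairwise_iff_getElem.mp hnodup) k' k hk' hk hlt
      exact this hb' hb
  -- groups are closed under adjacency
  have hclosed : ∀ (k : Nat) (hk : k < G.length), ∀ a ∈ G[k], ∀ b, adjR R a b →
      b ∈ G[k] := by
    intro k hk a ha b hadj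
    obtain ⟨han, hbn, x, hxa, hxb⟩ := hadj
    -- b is in some group
    have hbflat : b ∈ G.flatten := (hcov b).mpr hbn
    obtain ⟨gb, hgbmem, hbgb⟩ := List.mem_flatten.mp hbflat
    obtain ⟨k', hk', hgb⟩ := List.mem_iff_getElem.mp hgbmem
    subst hgb
    by_cases hkk : k = k'
    · subst hkk; exact hbgb
    · exfalso
      -- x is in both atom sets, contradicting pvDisj
      have hxk : x ∈ L[k]'(by omega) := ((hok k hk).2.2.2.2 x).mpr ⟨a, ha, hxa⟩
      have hxk' : x ∈ L[k']'(by omega) := ((hok k' hk').2.2.2.2 x).mpr ⟨b, hbgb, hxb⟩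
      have hgetD : ∀ (m : Nat) (hm : m < L.length), L.getD m [] = L[m] := by
        intro m hm
        simp [List.getD_eq_getElem?_getD, List.getElem?_eq_getElem hm]
      rcases Nat.lt_or_ge k k' with hlt | hge
      · have := hdisj k k' hlt (by omega)
        rw [hgetD k (by omega), hgetD k' (by omega)] at this
        have hx : x ∈ PySem.Set.inter (L[k]'(by omega)) (L[k']'(by omega)) :=
          (PySem.Set.mem_inter _ _ _).mpr ⟨hxk, hxk'⟩
        rw [this] at hx
        cases hx
      · have hlt : k' < k := by omega
        have := hdisj k' k hlt (by omega)
        rw [hgetD k' (by omega), hgetD k (by omega)] at this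
        have hx : x ∈ PySem.Set.inter (L[k']'(by omega)) (L[k]'(by omega)) :=
          (PySem.Set.mem_inter _ _ _).mpr ⟨hxk', hxk⟩
        rw [this] at hx
        cases hx
  have hreach_closed : ∀ (k : Nat) (hk : k < G.length), ∀ a ∈ G[k], ∀ b,
      reachR R a b → b ∈ G[k] := by
    intro k hk a ha b hr
    induction hr with
    | refl => exact ha
    | tail hstep hadj ihr => exact hclosed k hk _ ihr _ hadj
  refine ⟨G.map (·.headD 0), hheads, ?_, ?_⟩
  · intro i
    constructor
    · intro hi
      obtain ⟨g, hgmem, hghead⟩ := List.mem_map.mp hi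
      obtain ⟨k, hk, rfl⟩ := List.mem_iff_getElem.mp hgmem
      have hne : G[k] ≠ [] := (hok k hk).1
      have hhead_mem : G[k].headD 0 ∈ G[k] := pvHeadD_mem hne
      subst hghead
      refine ⟨((hok k hk).2.1 _ hhead_mem).2, ?_⟩
      intro j hrj
      have hj : j ∈ G[k] := hreach_closed k hk _ hhead_mem j (reachR_symm R hrj)
      exact ((hok k hk).2.1 j hj).1
    · rintro ⟨hin, hmin⟩
      have hiflat : i ∈ G.flatten := (hcov i).mpr hin
      obtain ⟨g, hgmem, higa⟩ := List.mem_flatten.mp hiflat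
      obtain ⟨k, hk, rfl⟩ := List.mem_iff_getElem.mp hgmem
      have hne : G[k] ≠ [] := (hok k hk).1
      have hhead_mem : G[k].headD 0 ∈ G[k] := pvHeadD_mem hne
      have h1 : G[k].headD 0 ≤ i := ((hok k hk).2.1 i higa).1
      have h2 : reachR R (G[k].headD 0) i := (hok k hk).2.2.1 _ hhead_mem i higa
      have h3 : i ≤ G[k].headD 0 := hmin _ h2
      have : i = G[k].headD 0 := by omega
      rw [this]
      exact List.mem_map.mpr ⟨G[k], hgmem, rfl⟩
  · rw [List.forall₂_iff_get]
    refine ⟨by simp [hlen], ?_⟩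
    intro k hk1 hk2
    simp only [List.get_eq_getElem, List.getElem_map]
    have hk : k < G.length := by simpa using hk1
    have hkL : k < L.length := by omega
    have hsnd : (L[k]'hkL).Nodup := (hok k hk).2.2.2.1
    have hperm : (PySem.List.sorted (L[k]'hkL) (fun x => x) false).Perm (L[k]'hkL) :=
      PySem.List.sorted_perm _ _ _
    have hsorted_nd : (PySem.List.sorted (L[k]'hkL) (fun x => x) false).Nodup :=
      hperm.symm.nodup hsnd
    have hsorted_le : (PySem.List.sorted (L[k]'hkL) (fun x => x) false).Pairwise (· ≤ ·) := by
      have := PySem.List.sorted_pairwise (xs := L[k]'hkL) (key := fun x => x) 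
      simpa using this
    constructor
    · exact (hsorted_le.and hsorted_nd).imp (fun h => lt_of_le_of_ne h.1 h.2)
    · intro x
      rw [PySem.List.mem_sorted]
      rw [(hok k hk).2.2.2.2 x]
      have hne : G[k] ≠ [] := (hok k hk).1
      have hhead_mem : G[k].headD 0 ∈ G[k] := pvHeadD_mem hne
      constructor
      · rintro ⟨j, hj, hx⟩
        exact ⟨j, (hok k hk).2.2.1 _ hhead_mem j hj, hx⟩
      · rintro ⟨j, hrj, hx⟩
        exact ⟨j, hreach_closed k hk _ hhead_mem j hrj, hx⟩

theorem pvA_char (R : List (List Int)) : pvCharP R (merge_fused_rings_py R) := by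
  unfold merge_fused_rings_py
  have hg1 : pvGood R (pvPhase1A R) := pvPhase1A_good R
  have hlen : (pvPhase1A R).length < R.length + 1 := by
    have := pvGood_length_le R _ hg1
    omega
  obtain ⟨hg2, hd2⟩ := pvWhileA_spec R (R.length + 1) (pvPhase1A R) hg1 hlen
  exact pvGood_disj_char R _ hg2 hd2
-- ===== B side =====
theorem pvFoldl_flatMap {α β γ : Type} (g : α → List β) (f : γ → β → γ) :
    ∀ (xs : List α) (init : γ),
      (xs.flatMap g).foldl f init = xs.foldl (fun acc x => (g x).foldl f acc) init := by
  intro xs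
  induction xs with
  | nil => intro init; rfl
  | cons x xs ih =>
    intro init
    rw [List.flatMap_cons, List.foldl_append, List.foldl_cons, ih]

theorem pvIndexB_mem (R : List (List Int)) (a : Int) (k : Nat) :
    k ∈ (pvIndexB R).getD a [] ↔ (k < R.length ∧ a ∈ ringN R k) := by
  unfold pvIndexB
  have hsplit : ∀ (d : PySem.Dict Int (List Nat)),
      R.zipIdx.foldl (fun d p => p.1.foldl (fun d atom => d.modify atom [] (· ++ [p.2])) d) d
      = (R.zipIdx.flatMap (fun p => p.1.map (fun atom => (atom, p.2)))).foldl
          (fun d q => d.modify q.1 [] (· ++ [q.2])) d := by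
    intro d
    rw [pvFoldl_flatMap]
    congr 1
    funext d' p
    rw [List.foldl_map]
  rw [hsplit]
  rw [PySem.Dict.getD_foldl_modify_append]
  simp only [PySem.Dict.getD_empty, List.nil_append]
  rw [List.mem_map]
  constructor
  · rintro ⟨q, hq, rfl⟩
    have hq' := List.mem_filter.mp hq
    obtain ⟨p, hp, hq2⟩ := List.mem_flatMap.mp hq'.1
    obtain ⟨atom, hatom, rfl⟩ := List.mem_map.mp hq2
    have hbeq : atom = a := by
      have := hq'.2
      simpa using this
    subst hbeq
    obtain ⟨hgl, hlt⟩ := List.mem_zipIdx hp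
    have hk : p.2 < R.length := by omega
    refine ⟨hk, ?_⟩
    rw [pvRingN_eq R p.2 hk]
    rw [show R[p.2] = p.1 from by simpa using (Eq.symm hlt.2)]
    exact hatom
  · rintro ⟨hk, ha⟩
    refine ⟨(a, k), List.mem_filter.mpr ⟨?_, by simp⟩, rfl⟩
    refine List.mem_flatMap.mpr ⟨(R[k], k), ?_, ?_⟩
    · exact List.mem_zipIdx_iff_getElem?.mpr (by simp [List.getElem?_eq_getElem hk])
    · refine List.mem_map.mpr ⟨a, ?_, rfl⟩
      rw [pvRingN_eq R k hk] at ha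
      exact ha

def pvUc (R : List (List Int)) (seen : PySem.Set Nat) : Nat :=
  ((List.range R.length).filter (fun t => !(PySem.Set.contains seen t))).length

theorem pvUc_le (R : List (List Int)) (seen : PySem.Set Nat) : pvUc R seen ≤ R.length := by
  unfold pvUc
  calc ((List.range R.length).filter _).length ≤ (List.range R.length).length :=
        List.length_filter_le _ _
    _ = R.length := List.length_range

theorem pvUc_add_lt (R : List (List Int)) (seen : PySem.Set Nat) (i : Nat)
    (hi : i < R.length) (hnot : i ∉ seen) :
    pvUc R (PySem.Set.add seen i) < pvUc R seen := by
  unfold pvUc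
  refine pvFilterLen_strict _ _ _ ?_ ⟨i, by simp [List.mem_range, hi], ?_, ?_⟩
  · intro t _ hq
    have h2 : t ∉ PySem.Set.add seen i := by
      intro hc
      rw [(pvContains_iff _ t).mpr hc] at hq
      cases hq
    have h3 : t ∉ seen := fun hc => h2 ((PySem.Set.mem_add _ _ _).mpr (Or.inl hc))
    rw [pvBool_false (fun hc => h3 ((pvContains_iff seen t).mp hc))]
    rfl
  · rw [pvBool_false (fun hc => hnot ((pvContains_iff seen i).mp hc))]
    rfl
  · rw [(pvContains_iff _ i).mpr ((PySem.Set.mem_add _ _ _).mpr (Or.inr rfl))]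
    rfl

theorem pvPushStep_spec (R : List (List Int)) :
    ∀ (ks stack : List Nat) (seen : PySem.Set Nat),
      stack.Nodup → seen.Nodup → (∀ t ∈ stack, t ∈ seen) →
      (let r := ks.foldl (fun (st : List Nat × PySem.Set Nat) k =>
          if PySem.Set.contains st.2 k then st else (k :: st.1, PySem.Set.add st.2 k)) (stack, seen)
       (∀ t, t ∈ r.2 ↔ t ∈ seen ∨ t ∈ ks) ∧
       (∀ t, t ∈ r.1 ↔ t ∈ stack ∨ (t ∈ ks ∧ t ∉ seen)) ∧
       r.1.Nodup ∧ r.2.Nodup ∧ (∀ t ∈ r.1, t ∈ r.2) ∧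
       ((∀ k ∈ ks, k < R.length) →
          r.1.length + pvUc R r.2 ≤ stack.length + pvUc R seen)) := by
  intro ks
  induction ks with
  | nil =>
    intro stack seen h1 h2 h3
    exact ⟨fun t => by simp, fun t => by simp, h1, h2, h3, fun _ => le_refl _⟩
  | cons k ks ih =>
    intro stack seen h1 h2 h3
    simp only [List.foldl_cons]
    by_cases hc : PySem.Set.contains seen k = true
    · rw [if_pos hc]
      have hkseen : k ∈ seen := (pvContains_iff seen k).mp hc
      obtain ⟨P1, P2, P3, P4, P5, P6⟩ := ih stack seen h1 h2 h3
      refine ⟨?_, ?_, P3, P4, P5, ?_⟩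
      · intro t
        rw [P1 t]
        simp only [List.mem_cons]
        constructor
        · rintro (h | h)
          · exact Or.inl h
          · exact Or.inr (Or.inr h)
        · rintro (h | rfl | h)
          · exact Or.inl h
          · exact Or.inl hkseen
          · exact Or.inr h
      · intro t
        rw [P2 t]
        simp only [List.mem_cons]
        constructor
        · rintro (h | h)
          · exact Or.inl h
          · exact Or.inr ⟨Or.inr h.1, h.2⟩
        · rintro (h | ⟨(rfl | h), hns⟩)
          · exact Or.inl h
          · exact absurd hkseen hns
          · exact Or.inr ⟨h, hns⟩
      · intro hbd
        exact P6 (fun k' hk' => hbd k' (by simp [hk']))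
    · rw [if_neg hc]
      have hknot : k ∉ seen := fun hm => hc ((pvContains_iff seen k).mpr hm)
      have h1' : (k :: stack).Nodup := by
        refine List.nodup_cons.mpr ⟨fun hm => hknot (h3 k hm), h1⟩
      have h2' : (PySem.Set.add seen k).Nodup := PySem.Set.nodup_add _ _ h2
      have h3' : ∀ t ∈ k :: stack, t ∈ PySem.Set.add seen k := by
        intro t ht
        rcases List.mem_cons.mp ht with rfl | ht
        · exact (PySem.Set.mem_add _ _ _).mpr (Or.inr rfl)
        · exact (PySem.Set.mem_add _ _ _).mpr (Or.inl (h3 t ht))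
      obtain ⟨P1, P2, P3, P4, P5, P6⟩ := ih (k :: stack) (PySem.Set.add seen k) h1' h2' h3'
      refine ⟨?_, ?_, P3, P4, P5, ?_⟩
      · intro t
        rw [P1 t]
        simp only [PySem.Set.mem_add, List.mem_cons]
        tauto
      · intro t
        rw [P2 t]
        simp only [PySem.Set.mem_add, List.mem_cons]
        constructor
        · rintro ((rfl | h) | ⟨h, hns⟩)
          · exact Or.inr ⟨Or.inl rfl, hknot⟩
          · exact Or.inl h
          · exact Or.inr ⟨Or.inr h, fun hm => hns (Or.inl hm)⟩
        · rintro (h | ⟨(rfl | h), hns⟩)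
          · exact Or.inl (Or.inr h)
          · exact Or.inl (Or.inl rfl)
          · by_cases htk : t = k
            · exact Or.inl (Or.inl htk)
            · exact Or.inr ⟨h, fun hm => (by
                rcases hm with hm | hm
                · exact hns hm
                · exact htk hm)⟩
      · intro hbd
        have hk : k < R.length := hbd k (by simp)
        have := P6 (fun k' hk' => hbd k' (by simp [hk']))
        have hdec := pvUc_add_lt R seen k hk hknot
        calc _ ≤ (k :: stack).length + pvUc R (PySem.Set.add seen k) := this
          _ ≤ stack.length + pvUc R seen := by
            simp only [List.length_cons]
            omega

theorem pvDfsB_spec (R : List (List Int)) :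
    ∀ (fuel : Nat) (stack : List Nat) (seen : PySem.Set Nat) (system : List Int),
      stack.length + pvUc R seen < fuel →
      stack.Nodup → seen.Nodup → (∀ t ∈ stack, t ∈ seen) → (∀ t ∈ stack, t < R.length) →
      system.Nodup →
      ∃ P : List Nat,
        (∀ t ∈ P, t < R.length) ∧
        (∀ t, t ∈ (pvDfsB R (pvIndexB R) fuel stack seen system).2 ↔ t ∈ seen ∨ t ∈ P) ∧
        (pvDfsB R (pvIndexB R) fuel stack seen system).2.Nodup ∧
        (∀ x, x ∈ (pvDfsB R (pvIndexB R) fuel stack seen system).1 ↔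
          x ∈ system ∨ ∃ j ∈ P, x ∈ ringN R j) ∧
        (pvDfsB R (pvIndexB R) fuel stack seen system).1.Nodup ∧
        (∀ t ∈ P, ∃ s ∈ stack, reachR R s t) ∧
        (∀ t ∈ stack, t ∈ P) ∧
        (∀ a ∈ P, ∀ b, adjR R a b →
          b ∈ (pvDfsB R (pvIndexB R) fuel stack seen system).2) := by
  intro fuel
  induction fuel with
  | zero => intro stack seen system hfuel; omega
  | succ fuel ih =>
    intro stack seen system hfuel hsnd hseennd hsub hbd hsysnd
    cases stack with
    | nil =>
      refine ⟨[], by simp, fun t => by simp [pvDfsB], by simp [pvDfsB, hseennd], 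
        fun x => by simp [pvDfsB], by simp [pvDfsB, hsysnd], by simp, by simp, by simp⟩
    | cons j rest =>
      have hjn : j < R.length := hbd j (by simp)
      have hjseen : j ∈ seen := hsub j (by simp)
      have hdfs_eq : pvDfsB R (pvIndexB R) (fuel+1) (j :: rest) seen system
          = pvDfsB R (pvIndexB R) fuel
              (pvPushB (pvIndexB R) (R.getD j []) (rest, seen)).1
              (pvPushB (pvIndexB R) (R.getD j []) (rest, seen)).2
              (PySem.Set.update system (R.getD j [])) := by
        rfl
      -- the push fold, flattened
      have hpush_eq : pvPushB (pvIndexB R) (R.getD j []) (rest, seen)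
          = ((R.getD j []).flatMap (fun atom => (pvIndexB R).getD atom [])).foldl
              (fun (st : List Nat × PySem.Set Nat) k =>
                if PySem.Set.contains st.2 k then st else (k :: st.1, PySem.Set.add st.2 k))
              (rest, seen) := by
        unfold pvPushB
        rw [pvFoldl_flatMap]
      set ks := (R.getD j []).flatMap (fun atom => (pvIndexB R).getD atom []) with hks
      have hks_mem : ∀ k, k ∈ ks ↔ adjR R j k := by
        intro k
        rw [hks, List.mem_flatMap]
        constructor
        · rintro ⟨atom, hatom, hk⟩
          obtain ⟨hkn, hka⟩ := (pvIndexB_mem R atom k).mp hk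
          exact ⟨hjn, hkn, atom, by rwa [ringN], hka⟩
        · rintro ⟨-, hkn, atom, hatom, hka⟩
          exact ⟨atom, by rwa [ringN] at hatom, (pvIndexB_mem R atom k).mpr ⟨hkn, hka⟩⟩
      have hrestnd : rest.Nodup := (List.nodup_cons.mp hsnd).2
      obtain ⟨P1, P2, P3, P4, P5, P6⟩ :=
        pvPushStep_spec R ks rest seen hrestnd hseennd (fun t ht => hsub t (by simp [ht]))
      rw [← hpush_eq] at P1 P2 P3 P4 P5 P6
      set st := pvPushB (pvIndexB R) (R.getD j []) (rest, seen) with hst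
      have hks_bd : ∀ k ∈ ks, k < R.length := by
        intro k hk
        exact ((hks_mem k).mp hk).2.1
      have hμ : st.1.length + pvUc R st.2 < fuel := by
        have := P6 hks_bd
        simp only [List.length_cons] at hfuel
        omega
      have hst_bd : ∀ t ∈ st.1, t < R.length := by
        intro t ht
        rcases (P2 t).mp ht with h | h
        · exact hbd t (by simp [h])
        · exact hks_bd t h.1
      have hsys'nd : (PySem.Set.update system (R.getD j [])).Nodup :=
        PySem.Set.nodup_update _ _ hsysnd
      obtain ⟨P, Q1, Q2, Q3, Q4, Q5, Q6, Q7, Q8⟩ :=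
        ih st.1 st.2 (PySem.Set.update system (R.getD j [])) hμ P3 P4 P5 hst_bd hsys'nd
      rw [hdfs_eq]
      refine ⟨j :: P, ?_, ?_, Q3, ?_, Q5, ?_, ?_, ?_⟩
      · intro t ht
        rcases List.mem_cons.mp ht with rfl | ht
        · exact hjn
        · exact Q1 t ht
      · intro t
        rw [Q2 t]
        constructor
        · rintro (h | h)
          · rcases (P1 t).mp h with h | h
            · exact Or.inl h
            · by_cases hts : t ∈ seen
              · exact Or.inl hts
              · exact Or.inr (by simp [Q7 t ((P2 t).mpr (Or.inr ⟨h, hts⟩))])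
          · exact Or.inr (by simp [h])
        · rintro (h | h)
          · exact Or.inl ((P1 t).mpr (Or.inl h))
          · rcases List.mem_cons.mp h with rfl | h
            · exact Or.inl ((P1 t).mpr (Or.inl hjseen))
            · exact Or.inr h
      · intro x
        rw [Q4 x]
        simp only [PySem.Set.mem_update]
        constructor
        · rintro ((h | h) | ⟨j', hj', hx⟩)
          · exact Or.inl h
          · exact Or.inr ⟨j, by simp, by rwa [ringN]⟩
          · exact Or.inr ⟨j', by simp [hj'], hx⟩
        · rintro (h | ⟨j', hj', hx⟩)
          · exact Or.inl (Or.inl h)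
          · rcases List.mem_cons.mp hj' with rfl | hj'
            · exact Or.inl (Or.inr (by rwa [ringN] at hx))
            · exact Or.inr ⟨j', hj', hx⟩
      · intro t ht
        rcases List.mem_cons.mp ht with rfl | ht
        · exact ⟨t, by simp, Relation.ReflTransGen.refl⟩
        · obtain ⟨s, hs, hr⟩ := Q6 t ht
          rcases (P2 s).mp hs with h | h
          · exact ⟨s, by simp [h], hr⟩
          · refine ⟨j, by simp, ?_⟩
            have hadj : adjR R j s := (hks_mem s).mp h.1
            exact Relation.ReflTransGen.trans (Relation.ReflTransGen.single hadj) hr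
      · intro t ht
        rcases List.mem_cons.mp ht with rfl | ht
        · simp
        · exact List.mem_cons.mpr (Or.inr (Q7 t ((P2 t).mpr (Or.inl ht))))
      · intro a ha b hadj
        rcases List.mem_cons.mp ha with rfl | ha
        · have hbks : b ∈ ks := (hks_mem b).mpr hadj
          exact (Q2 b).mpr (Or.inl ((P1 b).mpr (Or.inr hbks)))
        · exact Q8 a ha b hadj

theorem pvLoopB_spec (R : List (List Int)) :
    ∀ (k i : Nat), R.length - i ≤ k →
      ∀ (seen : PySem.Set Nat) (systems : List (List Int)) (hs : List Nat),
      seen.Nodup →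
      (∀ t, t ∈ seen ↔ t < R.length ∧ ∃ m, m < i ∧ reachR R m t) →
      hs.Pairwise (· < ·) →
      (∀ t, t ∈ hs ↔ t < i ∧ t < R.length ∧ ∀ j, reachR R j t → t ≤ j) →
      List.Forall₂ (fun h s => s.Nodup ∧ ∀ x, x ∈ s ↔ ∃ j, reachR R h j ∧ x ∈ ringN R j)
        hs systems →
      ∃ hs' : List Nat,
        hs'.Pairwise (· < ·) ∧
        (∀ t, t ∈ hs' ↔ t < R.length ∧ ∀ j, reachR R j t → t ≤ j) ∧
        List.Forall₂ (fun h s => s.Nodup ∧ ∀ x, x ∈ s ↔ ∃ j, reachR R h j ∧ x ∈ ringN R j)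
          hs' (pvLoopB R (pvIndexB R) i seen systems) := by
  intro k
  induction k with
  | zero =>
    intro i hi seen systems hs hseennd hseenchar hpw hschar hf
    have hge : ¬ i < R.length := by omega
    unfold pvLoopB
    rw [if_neg hge]
    refine ⟨hs, hpw, ?_, hf⟩
    intro t
    rw [hschar t]
    constructor
    · rintro ⟨-, h2, h3⟩
      exact ⟨h2, h3⟩
    · rintro ⟨h2, h3⟩
      exact ⟨by omega, h2, h3⟩
  | succ k ihk =>
    intro i hi seen systems hs hseennd hseenchar hpw hschar hf
    by_cases hlt : i < R.length
    · unfold pvLoopB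
      rw [if_pos hlt]
      by_cases hc : PySem.Set.contains seen i = true
      · rw [if_pos hc]
        have hiseen : i ∈ seen := (pvContains_iff seen i).mp hc
        obtain ⟨-, m0, hm0, hr0⟩ := (hseenchar i).mp hiseen
        refine ihk (i+1) (by omega) seen systems hs hseennd ?_ hpw ?_ hf
        · intro t
          rw [hseenchar t]
          constructor
          · rintro ⟨h1, m, hm, hr⟩
            exact ⟨h1, m, by omega, hr⟩
          · rintro ⟨h1, m, hm, hr⟩
            rcases Nat.lt_or_ge m i with hmi | hmi
            · exact ⟨h1, m, hmi, hr⟩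
            · have hmi' : m = i := by omega
              subst hmi'
              exact ⟨h1, m0, hm0, Relation.ReflTransGen.trans hr0 hr⟩
        · intro t
          rw [hschar t]
          constructor
          · rintro ⟨h1, h2, h3⟩
            exact ⟨by omega, h2, h3⟩
          · rintro ⟨h1, h2, h3⟩
            rcases Nat.lt_or_ge t i with hti | hti
            · exact ⟨hti, h2, h3⟩
            · have hti' : t = i := by omega
              subst hti'
              exact absurd (h3 m0 hr0) (by omega)
      · rw [if_neg hc]
        have hnot : i ∉ seen := fun hm => hc ((pvContains_iff seen i).mpr hm)
        have hseen1nd : (PySem.Set.add seen i).Nodup := PySem.Set.nodup_add _ _ hseennd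
        have hμ : ([i] : List Nat).length + pvUc R (PySem.Set.add seen i) < R.length + 1 := by
          have h1 := pvUc_add_lt R seen i hlt hnot
          have h2 := pvUc_le R seen
          simp only [List.length_cons, List.length_nil]
          omega
        obtain ⟨P, Q1, Q2, Q3, Q4, Q5, Q6, Q7, Q8⟩ :=
          pvDfsB_spec R (R.length + 1) [i] (PySem.Set.add seen i) [] hμ
            (by simp) hseen1nd
            (by intro t ht; simp only [List.mem_singleton] at ht; subst ht
                exact (PySem.Set.mem_add _ _ _).mpr (Or.inr rfl))
            (by intro t ht; simp only [List.mem_singleton] at ht; subst ht; exact hlt)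
            (by simp)
        set r := pvDfsB R (pvIndexB R) (R.length + 1) [i] (PySem.Set.add seen i) [] with hr
        have hiP : i ∈ P := Q7 i (by simp)
        have hPreach : ∀ t ∈ P, reachR R i t := by
          intro t ht
          obtain ⟨s, hsmem, hsr⟩ := Q6 t ht
          simp only [List.mem_singleton] at hsmem
          subst hsmem
          exact hsr
        have hP_iff : ∀ t, t ∈ P ↔ reachR R i t := by
          intro t
          refine ⟨hPreach t, ?_⟩
          intro hreach
          induction hreach with
          | refl => exact hiP
          | tail hstep hadj ihr =>
            have ha := ihr
            rcases (Q2 _).mp (Q8 _ ha _ hadj) with hseen1 | hP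
            · rcases (PySem.Set.mem_add _ _ _).mp hseen1 with hseen' | rfl
              · exfalso
                obtain ⟨-, m, hm, hrm⟩ := (hseenchar _).mp hseen'
                have hreach_mi : reachR R m i :=
                  Relation.ReflTransGen.trans hrm
                    (Relation.ReflTransGen.trans
                      (Relation.ReflTransGen.single (adjR_symm R hadj))
                      (reachR_symm R (hPreach _ ha)))
                exact hnot ((hseenchar i).mpr ⟨hlt, m, hm, hreach_mi⟩)
              · exact hiP
            · exact hP
        have hseedmin : ∀ j, reachR R j i → i ≤ j := by
          intro j hj
          by_contra hcon
          exact hnot ((hseenchar i).mpr ⟨hlt, j, by omega, hj⟩)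
        refine ihk (i+1) (by omega) r.2 (systems ++ [r.1]) (hs ++ [i]) Q3 ?_ ?_ ?_ ?_
        · intro t
          rw [Q2 t]
          constructor
          · rintro (h1 | hP)
            · rcases (PySem.Set.mem_add _ _ _).mp h1 with h1 | rfl
              · obtain ⟨hn, m, hm, hrm⟩ := (hseenchar t).mp h1
                exact ⟨hn, m, by omega, hrm⟩
              · exact ⟨hlt, t, by omega, Relation.ReflTransGen.refl⟩
            · exact ⟨Q1 t hP, i, by omega, hPreach t hP⟩
          · rintro ⟨hn, m, hm, hrm⟩
            rcases Nat.lt_or_ge m i with hmi | hmi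
            · exact Or.inl ((PySem.Set.mem_add _ _ _).mpr
                (Or.inl ((hseenchar t).mpr ⟨hn, m, hmi, hrm⟩)))
            · have hmi' : m = i := by omega
              subst hmi'
              exact Or.inr ((hP_iff t).mpr hrm)
        · rw [List.pairwise_append]
          refine ⟨hpw, by simp, ?_⟩
          intro a ha b hb
          simp only [List.mem_singleton] at hb
          subst hb
          exact ((hschar a).mp ha).1
        · intro t
          simp only [List.mem_append, List.mem_singleton]
          rw [hschar t]
          constructor
          · rintro (⟨h1, h2, h3⟩ | rfl)
            · exact ⟨by omega, h2, h3⟩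
            · exact ⟨by omega, hlt, hseedmin⟩
          · rintro ⟨h1, h2, h3⟩
            rcases Nat.lt_or_ge t i with hti | hti
            · exact Or.inl ⟨hti, h2, h3⟩
            · exact Or.inr (by omega)
        · refine pvForall₂_append hf (List.Forall₂.cons ⟨Q5, ?_⟩ List.Forall₂.nil)
          intro x
          rw [Q4 x]
          simp only [List.not_mem_nil, false_or]
          constructor
          · rintro ⟨j, hj, hx⟩
            exact ⟨j, (hP_iff j).mp hj, hx⟩
          · rintro ⟨j, hj, hx⟩
            exact ⟨j, (hP_iff j).mpr hj, hx⟩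
    · unfold pvLoopB
      rw [if_neg hlt]
      refine ⟨hs, hpw, ?_, hf⟩
      intro t
      rw [hschar t]
      constructor
      · rintro ⟨-, h2, h3⟩
        exact ⟨h2, h3⟩
      · rintro ⟨h2, h3⟩
        exact ⟨by omega, h2, h3⟩

theorem pvB_char (R : List (List Int)) : pvCharP R (merge_fused_rings_py_alt R) := by
  unfold merge_fused_rings_py_alt
  obtain ⟨hs', hpw, hchar, hf⟩ :=
    pvLoopB_spec R R.length 0 (by omega) [] [] []
      (by simp) (fun t => by simp) (by simp) (fun t => by simp) List.Forall₂.nil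
  refine ⟨hs', hpw, hchar, ?_⟩
  rw [List.forall₂_iff_get]
  have hlen := hf.length_eq
  refine ⟨by simpa using hlen, ?_⟩
  intro m hm1 hm2
  have hmL : m < (pvLoopB R (pvIndexB R) 0 [] []).length := by omega
  have hok := (List.forall₂_iff_get.mp hf).2 m hm1 hmL
  simp only [List.get_eq_getElem] at hok
  obtain ⟨hnd, hmem⟩ := hok
  simp only [List.get_eq_getElem, List.getElem_map]
  have hperm : (PySem.List.sorted ((pvLoopB R (pvIndexB R) 0 [] [])[m]'hmL) (fun x => x) false).Perm
      ((pvLoopB R (pvIndexB R) 0 [] [])[m]'hmL) := PySem.List.sorted_perm _ _ _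
  have hsorted_nd := hperm.symm.nodup hnd
  have hsorted_le : (PySem.List.sorted ((pvLoopB R (pvIndexB R) 0 [] [])[m]'hmL)
      (fun x => x) false).Pairwise (· ≤ ·) := by
    have := PySem.List.sorted_pairwise (xs := (pvLoopB R (pvIndexB R) 0 [] [])[m]'hmL)
      (key := fun x : Int => x)
    simpa using this
  refine ⟨(hsorted_le.and hsorted_nd).imp (fun h => lt_of_le_of_ne h.1 h.2), ?_⟩
  intro x
  rw [PySem.List.mem_sorted]
  exact hmem x

-- ===== VERDICT (by name: the statement is the Claim_ definition above) =====
theorem merge_fused_rings_py_spec : Claim_equal_merge_fused_rings_py := by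
  intro rings _
  unfold Spec_merge_fused_rings_py
  exact pvCharP_unique rings _ _ (pvA_char rings) (pvB_char rings)
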